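-- pv_equiv track=rewrite | github.com/rayimanoj-oliva/wb-crm | controllers/components/interactive_type_clean.py | _generate_time_rows_for_slot
-- ===== SOURCE A (Python) =====
-- def _generate_time_rows_for_slot(slot_id: str) -> list:
--     """Generate time selection rows for a specific slot."""
--     try:
--         if slot_id == "slot_morning":
--             times = ["09:00", "09:30", "10:00", "10:30", "11:00", "11:30"]
--         elif slot_id == "slot_afternoon":
--             times = ["14:00", "14:30", "15:00", "15:30", "16:00", "16:30"]
--         elif slot_id == "slot_evening":
--             times = ["18:00", "18:30", "19:00", "19:30", "20:00", "20:30"]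
--         else:
--             return []
--
--         rows = []
--         for time in times:
--             rows.append({
--                 "id": f"time_{time}",
--                 "title": time,
--                 "description": f"Book at {time}"
--             })
--
--         return rows
--     except Exception:
--         return []
-- ===== SOURCE B (Python) =====
-- _SLOT_BASE_HOUR = {"slot_morning": 9, "slot_afternoon": 14, "slot_evening": 18}
--
--
-- def _generate_time_rows_for_slot(slot_id: str) -> list:
--     base = _SLOT_BASE_HOUR.get(slot_id)
--     if base is None:
--         return []
--     rows = []
--     for offset in range(0, 180, 30):
--         t = f"{base + offset // 60:02d}:{offset % 60:02d}"
--         rows.append({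
--             "id": f"time_{t}",
--             "title": t,
--             "description": f"Book at {t}",
--         })
--     return rows
-- ===== Notes on version B (the rewrite author's own statement) =====
-- stated objective: idiomatic
-- what changed: Replaces the three hardcoded time-string lists and if/elif chain by a slot->base-hour dict lookup and a closed-form generation of the six times from 30-minute offsets with zero-padded formatting.
import Mathlib
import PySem

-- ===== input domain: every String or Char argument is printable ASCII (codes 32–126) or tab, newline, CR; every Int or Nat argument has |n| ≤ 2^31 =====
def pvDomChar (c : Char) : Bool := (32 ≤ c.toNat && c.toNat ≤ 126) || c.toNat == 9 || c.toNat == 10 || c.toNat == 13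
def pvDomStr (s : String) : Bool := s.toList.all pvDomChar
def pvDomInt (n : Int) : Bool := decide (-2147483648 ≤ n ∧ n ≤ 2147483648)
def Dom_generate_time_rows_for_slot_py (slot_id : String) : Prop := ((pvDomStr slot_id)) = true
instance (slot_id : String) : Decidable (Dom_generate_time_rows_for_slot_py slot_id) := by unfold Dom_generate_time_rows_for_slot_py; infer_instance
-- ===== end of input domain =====

-- B replaces the hardcoded time lists by a slot->base-hour dict and computes the six times from 30-minute offsets (idiomatic; same behaviour).

-- ===== PORT A =====
def pvRowsA (times : List String) : List (List (String × String)) :=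
  times.foldl (fun rows t =>
    rows ++ [[("id", "time_" ++ t), ("title", t), ("description", "Book at " ++ t)]]) []

def generate_time_rows_for_slot_py (slot_id : String) : List (List (String × String)) :=
  if slot_id = "slot_morning" then
    pvRowsA ["09:00", "09:30", "10:00", "10:30", "11:00", "11:30"]
  else if slot_id = "slot_afternoon" then
    pvRowsA ["14:00", "14:30", "15:00", "15:30", "16:00", "16:30"]
  else if slot_id = "slot_evening" then
    pvRowsA ["18:00", "18:30", "19:00", "19:30", "20:00", "20:30"]
  else []

-- ===== PORT B =====
-- f"{n:02d}" for 0 ≤ n < 100 (exact on that range, which is all B uses)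
def pvPad2 (n : Int) : String :=
  if n < 10 then "0" ++ PySem.Int.toStr n else PySem.Int.toStr n

def pvSlotBaseHour : PySem.Dict String Int :=
  PySem.Dict.ofList [("slot_morning", 9), ("slot_afternoon", 14), ("slot_evening", 18)]

def generate_time_rows_for_slot_py_alt (slot_id : String) : List (List (String × String)) :=
  match pvSlotBaseHour.get? slot_id with
  | none => []
  | some base =>
    (PySem.List.pyRange 0 180 30).foldl (fun rows offset =>
      let t := pvPad2 (base + PySem.Int.floordiv offset 60) ++ ":" ++ pvPad2 (PySem.Int.mod offset 60)
      rows ++ [[("id", "time_" ++ t), ("title", t), ("description", "Book at " ++ t)]]) []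

-- ===== PRECONDITION & SPEC =====
def Spec_generate_time_rows_for_slot_py (slot_id : String) (out : List (List (String × String))) : Prop := out = generate_time_rows_for_slot_py_alt slot_id
instance (slot_id : String) (out : List (List (String × String))) : Decidable (Spec_generate_time_rows_for_slot_py slot_id out) := by unfold Spec_generate_time_rows_for_slot_py; infer_instance

-- ===== CLAIM (what is proved, stated in full; the proofs are below) =====
def Claim_equal_generate_time_rows_for_slot_py : Prop := ∀ (slot_id : String), Dom_generate_time_rows_for_slot_py slot_id → Spec_generate_time_rows_for_slot_py slot_id (generate_time_rows_for_slot_py slot_id)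

-- ===== LEMMAS AND PROOFS =====
theorem pv_other (slot_id : String) (h1 : slot_id ≠ "slot_morning")
    (h2 : slot_id ≠ "slot_afternoon") (h3 : slot_id ≠ "slot_evening") :
    generate_time_rows_for_slot_py slot_id = generate_time_rows_for_slot_py_alt slot_id := by
  have g : pvSlotBaseHour.get? slot_id = none := by
    simp [pvSlotBaseHour, PySem.Dict.ofList, PySem.Dict.update, List.foldl,
      PySem.Dict.get?_insert, h1, h2, h3]
  simp [generate_time_rows_for_slot_py, generate_time_rows_for_slot_py_alt, h1, h2, h3, g]

-- ===== VERDICT (by name: the statement is the Claim_ definition above) =====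
theorem generate_time_rows_for_slot_py_spec : Claim_equal_generate_time_rows_for_slot_py := by
  intro slot_id _
  unfold Spec_generate_time_rows_for_slot_py
  by_cases h1 : slot_id = "slot_morning"
  · subst h1; decide
  by_cases h2 : slot_id = "slot_afternoon"
  · subst h2; decide
  by_cases h3 : slot_id = "slot_evening"
  · subst h3; decide
  exact pv_other slot_id h1 h2 h3
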